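-- pv_equiv track=rewrite | github.com/SuperOptimizer/villa | vesuvius/src/vesuvius/image_proc/run/zarr_tasks/utils.py | get_chunk_coords
-- ===== SOURCE A (Python) =====
-- import itertools
-- from typing import List, Tuple
--
-- def get_chunk_coords(
--     shape: Tuple[int, ...], chunks: Tuple[int, ...]
-- ) -> List[Tuple[Tuple[int, int], ...]]:
--     """Generate coordinates for all chunks in the array.
--
--     Args:
--         shape: Array shape
--         chunks: Chunk sizes
--
--     Returns:
--         List of chunk coordinates, where each coordinate is a tuple of
--         (start, stop) pairs for each dimension
--     """
--     chunk_ranges = []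
--     for dim_size, chunk_size in zip(shape, chunks):
--         ranges = []
--         for start in range(0, dim_size, chunk_size):
--             stop = min(start + chunk_size, dim_size)
--             ranges.append((start, stop))
--         chunk_ranges.append(ranges)
--
--     return list(itertools.product(*chunk_ranges))
-- ===== SOURCE B (Python) =====
-- def get_chunk_coords(shape, chunks):
--     """Enumerate all chunk (start, stop) coordinate tuples by mixed-radix index
--     arithmetic instead of itertools.product (same per-dimension ranges)."""
--     ranges = [
--         [(start, min(start + chunk_size, dim_size))
--          for start in range(0, dim_size, chunk_size)]
--         for dim_size, chunk_size in zip(shape, chunks)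
--     ]
--     total = 1
--     for r in ranges:
--         total *= len(r)
--     out = []
--     for i in range(total):
--         coord = []
--         rem = i
--         for r in reversed(ranges):
--             rem, k = divmod(rem, len(r))
--             coord.append(r[k])
--         coord.reverse()
--         out.append(tuple(coord))
--     return out
-- ===== Notes on version B (the rewrite author's own statement) =====
-- stated objective: alternative
-- what changed: The Cartesian product of the per-dimension (start,stop) ranges is enumerated by mixed-radix index arithmetic (one counter i in range(total), decoded by successive divmod from the last dimension) instead of delegating to itertools.product.
import Mathlib
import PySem

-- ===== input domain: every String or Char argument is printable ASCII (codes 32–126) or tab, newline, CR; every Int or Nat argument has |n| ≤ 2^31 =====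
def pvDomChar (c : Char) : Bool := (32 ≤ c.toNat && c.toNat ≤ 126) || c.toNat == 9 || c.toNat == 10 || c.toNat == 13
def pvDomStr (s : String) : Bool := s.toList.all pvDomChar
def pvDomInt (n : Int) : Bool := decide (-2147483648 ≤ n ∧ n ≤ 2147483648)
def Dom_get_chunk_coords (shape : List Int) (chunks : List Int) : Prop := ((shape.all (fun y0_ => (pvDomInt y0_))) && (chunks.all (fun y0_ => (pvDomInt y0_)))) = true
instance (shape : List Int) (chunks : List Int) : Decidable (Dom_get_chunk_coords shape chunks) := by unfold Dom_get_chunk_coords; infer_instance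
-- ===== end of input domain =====

-- B enumerates the Cartesian product of the per-dimension chunk ranges by mixed-radix
-- index arithmetic (one counter decoded by successive divmod) instead of itertools.product
-- (objective: alternative; same asymptotic cost).


-- ===== PORT A =====
-- itertools.product(*rs), transliterated structurally (first factor varies slowest).
def pvProdA (rs : List (List (Int × Int))) : List (List (Int × Int)) :=
  match rs with
  | [] => [[]]
  | r :: tl => r.flatMap (fun x => (pvProdA tl).map (fun t => x :: t))

def get_chunk_coords (shape : List Int) (chunks : List Int) : List (List (Int × Int)) :=
  -- chunk_ranges = []; for dim_size, chunk_size in zip(shape, chunks):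
  --   ranges = []; for start in range(0, dim_size, chunk_size): ranges.append((start, min(start+chunk_size, dim_size)))
  let chunk_ranges := (shape.zip chunks).foldl (fun acc dc =>
    acc ++ [(PySem.List.pyRange 0 dc.1 dc.2).foldl
      (fun rng start => rng ++ [(start, min (start + dc.2) dc.1)]) []]) []
  pvProdA chunk_ranges

-- ===== PORT B =====
-- one pass of the inner loop body: rem, k = divmod(rem, len(r)); coord.append(r[k]).
-- divmod / r[k] are exact here: whenever the outer loop runs, total > 0, so every
-- len(r) > 0 and k = rem % len(r) is always in range (the default (0,0) is never used).
def pvStepB (st : List (Int × Int) × Int) (r : List (Int × Int)) : List (Int × Int) × Int :=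
  (st.1 ++ [PySem.List.pyGetD r (PySem.Int.mod st.2 (r.length : Int)) (0, 0)],
   PySem.Int.floordiv st.2 (r.length : Int))

-- coord = []; rem = i; for r in reversed(ranges): ...; coord.reverse()
def pvDecodeB (rs : List (List (Int × Int))) (i : Int) : List (Int × Int) :=
  ((rs.reverse.foldl pvStepB ([], i)).1).reverse

def get_chunk_coords_alt (shape : List Int) (chunks : List Int) : List (List (Int × Int)) :=
  let ranges := (shape.zip chunks).map (fun dc =>
    (PySem.List.pyRange 0 dc.1 dc.2).map (fun start => (start, min (start + dc.2) dc.1)))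
  let total : Int := ranges.foldl (fun t r => t * (r.length : Int)) 1
  (PySem.List.pyRange 0 total 1).foldl (fun out i => out ++ [pvDecodeB ranges i]) []

-- ===== PRECONDITION & SPEC =====
-- Pre_ excludes exactly the inputs on which Python raises: range(0, d, 0) is a ValueError,
-- so every chunk size actually paired with a dimension must be nonzero.
def Pre_get_chunk_coords (shape : List Int) (chunks : List Int) : Prop :=
  ∀ p ∈ shape.zip chunks, p.2 ≠ 0
instance (shape : List Int) (chunks : List Int) : Decidable (Pre_get_chunk_coords shape chunks) := by unfold Pre_get_chunk_coords; infer_instance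

def pvWitness_get_chunk_coords : List Int × List Int := ([4, 5], [2, 3])

def Spec_get_chunk_coords (shape : List Int) (chunks : List Int) (out : List (List (Int × Int))) : Prop := out = get_chunk_coords_alt shape chunks
instance (shape : List Int) (chunks : List Int) (out : List (List (Int × Int))) : Decidable (Spec_get_chunk_coords shape chunks out) := by unfold Spec_get_chunk_coords; infer_instance

-- ===== CLAIM (what is proved, stated in full; the proofs are below) =====
def Claim_equal_get_chunk_coords : Prop := ∀ (shape : List Int) (chunks : List Int), Dom_get_chunk_coords shape chunks → Pre_get_chunk_coords shape chunks → Spec_get_chunk_coords shape chunks (get_chunk_coords shape chunks)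

-- ===== LEMMAS AND PROOFS =====

-- product of the lengths, as a Nat
def pvT (rs : List (List (Int × Int))) : Nat := (rs.map List.length).prod

-- proof-side mixed-radix decoder, forward over the dimensions, on Nat indices
def pvDec (rs : List (List (Int × Int))) (i : Nat) : List (Int × Int) :=
  match rs with
  | [] => []
  | r :: tl => PySem.List.pyGetD r ((i / pvT tl % r.length : Nat) : Int) (0, 0) :: pvDec tl i

theorem pvT_cons (r : List (Int × Int)) (tl : List (List (Int × Int))) :
    pvT (r :: tl) = r.length * pvT tl := by simp [pvT]

theorem pvTotal_eq (rs : List (List (Int × Int))) (a : Int) :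
    rs.foldl (fun t r => t * (r.length : Int)) a = a * (pvT rs : Int) := by
  induction rs generalizing a with
  | nil => simp [pvT]
  | cons r tl ih =>
      rw [List.foldl_cons, ih, pvT_cons]
      push_cast
      ring

theorem pvStepB_foldr (rs : List (List (Int × Int))) (i : Nat) :
    rs.foldr (fun r st => pvStepB st r) ([], (i : Int))
      = ((pvDec rs i).reverse, ((i / pvT rs : Nat) : Int)) := by
  induction rs with
  | nil => simp [pvT, pvDec]
  | cons r tl ih =>
      rw [List.foldr_cons, ih]
      simp only [pvStepB, pvDec, List.reverse_cons, PySem.Int.mod_natCast,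
        PySem.Int.floordiv_natCast, Prod.mk.injEq]
      refine ⟨trivial, ?_⟩
      rw [Nat.div_div_eq_div_mul]
      congr 2
      rw [pvT_cons, Nat.mul_comm]

theorem pvDecodeB_eq (rs : List (List (Int × Int))) (i : Nat) :
    pvDecodeB rs (i : Int) = pvDec rs i := by
  unfold pvDecodeB
  rw [List.foldl_reverse, pvStepB_foldr]
  simp

theorem pvDec_mod (rs : List (List (Int × Int))) (i : Nat) :
    pvDec rs (i % pvT rs) = pvDec rs i := by
  induction rs generalizing i with
  | nil => rfl
  | cons r tl ih =>
      rcases Nat.eq_zero_or_pos (pvT tl) with h0 | _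
      · simp [pvT_cons, h0]
      · simp only [pvDec, pvT_cons, List.cons.injEq]
        refine ⟨?_, ?_⟩
        · congr 2
          rw [Nat.mul_comm r.length (pvT tl), Nat.mod_mul_right_div_self]
          exact Nat.mod_mod_of_dvd _ dvd_rfl
        · have h1 : i % (r.length * pvT tl) % pvT tl = i % pvT tl :=
            Nat.mod_mod_of_dvd i (dvd_mul_left _ _)
          calc pvDec tl (i % (r.length * pvT tl))
              = pvDec tl (i % (r.length * pvT tl) % pvT tl) := (ih _).symm
            _ = pvDec tl (i % pvT tl) := by rw [h1]
            _ = pvDec tl i := ih i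

theorem pvRange_mul_flatMap (m n : Nat) :
    List.range (m * n) = (List.range m).flatMap (fun q => (List.range n).map (fun j => q * n + j)) := by
  induction m with
  | zero => simp
  | succ m ih =>
      rw [Nat.succ_mul, List.range_add, ih, List.range_succ, List.flatMap_append]
      simp [Nat.mul_comm]

theorem pvFlatMap_range_getD (l : List (Int × Int)) (f : (Int × Int) → List (List (Int × Int))) :
    l.flatMap f = (List.range l.length).flatMap (fun q => f (l.getD q (0, 0))) := by
  induction l generalizing f with
  | nil => simp
  | cons x tl ih =>
      rw [List.flatMap_cons, List.length_cons, List.range_succ_eq_map, List.flatMap_cons,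
        List.flatMap_map]
      simp only [List.getD_cons_zero, List.getD_cons_succ]
      rw [ih]

theorem pvProdA_eq (rs : List (List (Int × Int))) :
    pvProdA rs = (List.range (pvT rs)).map (fun i => pvDec rs i) := by
  induction rs with
  | nil => rfl
  | cons r tl ih =>
      rcases Nat.eq_zero_or_pos (pvT tl) with h0 | hpos
      · simp [pvProdA, ih, h0, pvT_cons]
      · show r.flatMap (fun x => (pvProdA tl).map (fun t => x :: t)) = _
        rw [ih, pvT_cons, pvRange_mul_flatMap,
          pvFlatMap_range_getD r (fun x => ((List.range (pvT tl)).map (fun i => pvDec tl i)).map (fun t => x :: t)),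
          List.map_flatMap]
        apply List.flatMap_congr
        intro q hq
        have hqm : q < r.length := List.mem_range.mp hq
        rw [List.map_map, List.map_map]
        apply List.map_congr_left
        intro j hj
        have hjT : j < pvT tl := List.mem_range.mp hj
        show r.getD q (0, 0) :: pvDec tl j = pvDec (r :: tl) (q * pvT tl + j)
        simp only [pvDec]
        refine congrArg₂ _ ?_ ?_
        · have hdiv : (q * pvT tl + j) / pvT tl = q := by
            rw [Nat.mul_comm q (pvT tl), Nat.mul_add_div hpos, Nat.div_eq_of_lt hjT,
              Nat.add_zero]
          rw [hdiv, Nat.mod_eq_of_lt hqm, PySem.List.pyGetD_natCast]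
        · rw [← pvDec_mod tl (q * pvT tl + j), Nat.mul_comm q (pvT tl), Nat.mul_add_mod,
            Nat.mod_eq_of_lt hjT]

-- ===== VERDICT (by name: the statement is the Claim_ definition above) =====
theorem get_chunk_coords_spec : Claim_equal_get_chunk_coords := by
  intro shape chunks _ _
  unfold Spec_get_chunk_coords get_chunk_coords get_chunk_coords_alt
  simp only [PySem.List.foldl_append_singleton_eq_map, List.nil_append]
  rw [pvTotal_eq, one_mul, PySem.List.pyRange_zero_nat, List.map_map, pvProdA_eq]
  apply List.map_congr_left
  intro k _
  exact (pvDecodeB_eq _ k).symm
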